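-- pv_equiv track=rewrite | github.com/vamosbada/Algorithm | Programmers/python/pg_159993.py | solution
-- ===== SOURCE A (Python) =====
-- from collections import deque
--
-- def solution(maps):
--     # 행과 열을 정한다.
--     rows = len(maps)
--     cols = len(maps[0])
--
--     # 시작점, 끝점, 레버 좌표 정함. # 파이썬은 함수 단위로 변수 스코프 할당됨
--     for r in range(rows):
--         for c in range(cols):
--             if maps[r][c] == 'S': start = (r, c)
--             elif maps[r][c] == 'E': end = (r, c)
--             elif maps[r][c] == 'L': lever = (r, c)
--
--     # BFS 로직을 수행하는 함수
--     def BFS(start_pos, end_pos):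
--         queue = deque([(*start_pos,0)]) # []으로 가두지 않으면 튜플이 요소가 각각 할당되므로 초기 덱의 요소가 3개인 상태로 시작함
--         # 방문 배열은 매번 초기화
--         visited = [[False for _ in range(cols)] for _ in range(rows)]
--         visited[start_pos[0]][start_pos[1]] = True
--
--         # 이동을 하는 배열을 만들어줌 : dr은 행이동, dc는 열이동 # 앞으로 문제 풀 때 행관련은 x대신 r, 열관련은 y대신 c 쓰기
--         dr = [0, 1, 0, -1]
--         dc = [1, 0, -1, 0]
--
--         # 큐가 빌 때까지 반복
--         while queue:
--             cur_r, cur_c, dist = queue.popleft()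
--
--             if (cur_r, cur_c) == end_pos: return dist
--
--             for i in range(4):
--                 nr, nc = cur_r + dr[i], cur_c + dc[i]
--
--                 # 범위나 조건에 어긋나서 안한다 보다는 이 범위나 조건에 해당되므로 실행된다가 코드길이가 짧고 좋음
--                 if 0 <= nr < rows and 0 <= nc < cols and not visited[nr][nc] and maps[nr][nc] != 'X':
--                     visited[nr][nc] = True
--                     queue.append((nr, nc, dist+1))
--
--         return -1
--
--     # S -> L 가는데 못찾을경우(=-1) -1 반환
--     time_to_lever = BFS(start, lever)
--
--     if time_to_lever == -1:
--         return -1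
--
--     # L -> E 가는데 못찾을경우(=-1) -1 반환
--     time_to_exit = BFS(lever, end)
--
--     if time_to_exit == -1:
--         return -1
--
--     return time_to_lever + time_to_exit
-- ===== SOURCE B (Python) =====
-- def solution(maps):
--     rows, cols = len(maps), len(maps[0])
--     # marker positions in one dict comprehension (last occurrence wins, as in a scan)
--     pos = {ch: (r, c) for r, row in enumerate(maps) for c, ch in enumerate(row[:cols])
--            if ch in 'SEL'}
--
--     # level-synchronous search: no queue and no per-cell distances -- whole frontier
--     # SETS are expanded at once and a single step counter is the distance
--     def steps(src, dst):
--         seen = {src}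
--         frontier = {src}
--         t = 0
--         while frontier:
--             if dst in frontier:
--                 return t
--             frontier = {(r + dr, c + dc)
--                         for (r, c) in frontier
--                         for dr, dc in ((0, 1), (1, 0), (0, -1), (-1, 0))
--                         if 0 <= r + dr < rows and 0 <= c + dc < cols
--                         and maps[r + dr][c + dc] != 'X'
--                         and (r + dr, c + dc) not in seen}
--             seen |= frontier
--             t += 1
--         return -1
--
--     leg1 = steps(pos['S'], pos['L'])
--     if leg1 == -1:
--         return -1
--     leg2 = steps(pos['L'], pos['E'])
--     return -1 if leg2 == -1 else leg1 + leg2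
-- ===== Notes on version B (the rewrite author's own statement) =====
-- stated objective: alternative
-- what changed: The FIFO-queue BFS carrying a per-node distance and an early-exit pop test is replaced by a level-synchronous search: whole frontier SETS are expanded at once by a set comprehension, a single shared step counter is the distance, and the target is tested by set membership in the current frontier; its per-node (row,col,dist) queue entries, visited matrix and deque disappear (a seen set and frontier set remain), and the marker scan becomes one dict comprehension.
import Mathlib
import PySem

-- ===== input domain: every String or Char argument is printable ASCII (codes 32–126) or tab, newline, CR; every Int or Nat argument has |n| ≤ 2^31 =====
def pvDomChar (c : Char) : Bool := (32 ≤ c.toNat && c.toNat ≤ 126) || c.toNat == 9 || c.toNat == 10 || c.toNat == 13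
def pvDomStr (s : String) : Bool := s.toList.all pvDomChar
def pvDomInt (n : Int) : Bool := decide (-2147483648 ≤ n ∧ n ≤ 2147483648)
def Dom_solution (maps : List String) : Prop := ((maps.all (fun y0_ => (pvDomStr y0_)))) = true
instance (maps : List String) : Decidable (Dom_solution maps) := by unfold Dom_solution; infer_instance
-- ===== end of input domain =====

-- B replaces the early-exit FIFO-queue BFS (per-node distances, visited matrix) by a
-- level-synchronous search expanding whole frontier sets with one shared step counter;
-- objective: alternative (same cost).

-- ===== PORT A =====
-- maps[r][c]; none = IndexError
def gridGetA (maps : List String) (r c : Int) : Option Char :=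
  (PySem.List.pyGet? maps r).bind (fun s => PySem.Str.pyGet? s c)

-- visited[r][c] (the indices are guarded 0 ≤ · < rows/cols before every access, so the
-- default never fires on inputs the Python reaches)
def visGet (v : List (List Bool)) (r c : Int) : Bool :=
  ((PySem.List.pyGet? v r).bind (fun row => PySem.List.pyGet? row c)).getD false

-- visited[r][c] = True
def visSet (v : List (List Bool)) (r c : Int) : List (List Bool) :=
  PySem.List.pySetD v r (PySem.List.pySetD (PySem.List.pyGetD v r []) c true)

def dirR : List Int := [0, 1, 0, -1]
def dirC : List Int := [1, 0, -1, 0]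

-- body of A's 'for i in range(4)'
def stepA (maps : List String) (rows cols cr cc d : Int)
    (st : List (Int × Int × Int) × List (List Bool)) (i : Int) :
    List (Int × Int × Int) × List (List Bool) :=
  let nr := cr + PySem.List.pyGetD dirR i 0
  let nc := cc + PySem.List.pyGetD dirC i 0
  if 0 ≤ nr ∧ nr < rows ∧ 0 ≤ nc ∧ nc < cols ∧ visGet st.2 nr nc = false ∧
      gridGetA maps nr nc ≠ some 'X' then
    (st.1 ++ [(nr, nc, d + 1)], visSet st.2 nr nc)
  else st

-- A's 'while queue' loop; the fuel only makes the recursion structural and never runs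
-- out (each iteration strictly decreases |queue| + #unvisited cells, proved below)
def bfsLoopA (maps : List String) (rows cols : Int) (endPos : Int × Int) :
    Nat → List (Int × Int × Int) → List (List Bool) → Int
  | 0, _, _ => -1
  | _ + 1, [], _ => -1
  | fuel + 1, (cr, cc, d) :: rest, visited =>
    if (cr, cc) = endPos then d
    else
      let st := (PySem.List.pyRange 0 4 1).foldl (stepA maps rows cols cr cc d) (rest, visited)
      bfsLoopA maps rows cols endPos fuel st.1 st.2

def bfsA (maps : List String) (rows cols : Int) (startPos endPos : Int × Int) : Int :=
  let visited0 := List.replicate rows.toNat (List.replicate cols.toNat false)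
  let visited1 := visSet visited0 startPos.1 startPos.2
  bfsLoopA maps rows cols endPos (rows.toNat * cols.toNat) [(startPos.1, startPos.2, 0)] visited1

-- the start/end/lever scan: the state is (start?, end?, lever?); Python's not-yet-assigned
-- variables are none (reading one of them raises NameError: outside Pre_)
def scanA (maps : List String) (rows cols : Int) :
    Option (Int × Int) × Option (Int × Int) × Option (Int × Int) :=
  (PySem.List.pyRange 0 rows 1).foldl (fun st r =>
    (PySem.List.pyRange 0 cols 1).foldl (fun st c =>
      if gridGetA maps r c = some 'S' then (some (r, c), st.2.1, st.2.2)
      else if gridGetA maps r c = some 'E' then (st.1, some (r, c), st.2.2)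
      else if gridGetA maps r c = some 'L' then (st.1, st.2.1, some (r, c))
      else st) st) (none, none, none)

def solution (maps : List String) : Int :=
  match maps with
  | [] => -1          -- Python raises IndexError on len(maps[0]); outside Pre_
  | m0 :: _ =>
    let rows : Int := maps.length
    let cols : Int := m0.toList.length
    match scanA maps rows cols with
    | (some s, some e, some l) =>
      let t1 := bfsA maps rows cols s l
      if t1 = -1 then -1
      else
        let t2 := bfsA maps rows cols l e
        if t2 = -1 then -1 else t1 + t2
    | _ => -1         -- Python raises NameError (some marker missing); outside Pre_

-- ===== PORT B =====
-- maps[r + dr][c + dc]; none = IndexError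
def gridGetB (maps : List String) (r c : Int) : Option Char :=
  (PySem.List.pyGet? maps r).bind (fun s => PySem.Str.pyGet? s c)

def dirsB : List (Int × Int) := [(0, 1), (1, 0), (0, -1), (-1, 0)]

-- one candidate of B's set comprehension (the guard, in Source B's order); the built
-- frontier is a PySem.Set, so the iteration order of the comprehension cannot matter
def bdir (maps : List String) (rows cols : Int) (seen : PySem.Set (Int × Int))
    (cr cc : Int) (acc : PySem.Set (Int × Int)) (d : Int × Int) : PySem.Set (Int × Int) :=
  let n : Int × Int := (cr + d.1, cc + d.2)
  if 0 ≤ n.1 ∧ n.1 < rows ∧ 0 ≤ n.2 ∧ n.2 < cols ∧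
      gridGetB maps n.1 n.2 ≠ some 'X' ∧ PySem.Set.contains seen n = false then
    PySem.Set.add acc n
  else acc

-- the whole comprehension: the next frontier set
def nextFrontier (maps : List String) (rows cols : Int)
    (seen fr : PySem.Set (Int × Int)) : PySem.Set (Int × Int) :=
  fr.foldl (fun acc p => dirsB.foldl (bdir maps rows cols seen p.1 p.2) acc) PySem.Set.empty

-- B's 'while frontier' loop; fuel only makes it structural (never runs out: every
-- round with a nonempty next frontier strictly grows seen, proved below)
def levelLoop (maps : List String) (rows cols : Int) (dst : Int × Int) :
    Nat → Int → PySem.Set (Int × Int) → PySem.Set (Int × Int) → Int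
  | 0, _, _, _ => -1
  | fuel + 1, t, seen, fr =>
    if fr = [] then -1
    else if PySem.Set.contains fr dst then t
    else
      let nxt := nextFrontier maps rows cols seen fr
      levelLoop maps rows cols dst fuel (t + 1) (PySem.Set.union seen nxt) nxt

def steps (maps : List String) (rows cols : Int) (src dst : Int × Int) : Int :=
  levelLoop maps rows cols dst (rows.toNat * cols.toNat + 1) 0
    (PySem.Set.ofList [src]) (PySem.Set.ofList [src])

-- Source B's dict comprehension over enumerate(maps) × enumerate(row[:cols]);
-- 'ch in "SEL"' on the one-character cell is membership in {'S','E','L'}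
def scanB (maps : List String) (cols : Int) : PySem.Dict Char (Int × Int) :=
  (PySem.List.enumerate maps).foldl (fun pos rp =>
    (PySem.List.enumerate (PySem.List.slice rp.2.toList none (some cols))).foldl
      (fun pos cp =>
        if ("SEL".toList.contains cp.2) then pos.insert cp.2 (rp.1, cp.1) else pos)
      pos)
    PySem.Dict.empty

def solution_alt (maps : List String) : Int :=
  if maps = [] then -1          -- Python raises IndexError; outside Pre_
  else
    let rows : Int := maps.length
    let cols : Int := maps.headI.toList.length
    let pos := scanB maps cols
    -- pos['S'] / pos['L'] / pos['E']; none = KeyError in Python, outside Pre_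
    match pos.get? 'S' with
    | none => -1
    | some s =>
      match pos.get? 'L' with
      | none => -1
      | some l =>
        match pos.get? 'E' with
        | none => -1
        | some e =>
          let leg1 := steps maps rows cols s l
          if leg1 = -1 then -1
          else
            let leg2 := steps maps rows cols l e
            if leg2 = -1 then -1 else leg1 + leg2

-- ===== PRECONDITION & SPEC =====
-- Pre_ excludes exactly the inputs on which Python A raises (it returns on all others):
-- the empty list (IndexError on maps[0]), a row shorter than the first row (IndexError in
-- the scan), and grids whose first-len(maps[0]) columns never show 'S', 'E' or 'L'
-- (NameError at the BFS calls).
def Pre_solution (maps : List String) : Prop :=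
  maps ≠ [] ∧
  (∀ s ∈ maps, maps.headI.toList.length ≤ s.toList.length) ∧
  maps.any (fun s => (s.toList.take maps.headI.toList.length).contains 'S') = true ∧
  maps.any (fun s => (s.toList.take maps.headI.toList.length).contains 'E') = true ∧
  maps.any (fun s => (s.toList.take maps.headI.toList.length).contains 'L') = true
instance (maps : List String) : Decidable (Pre_solution maps) := by
  unfold Pre_solution; infer_instance

def pvWitness_solution : List String := ["SX", "LE"]

def Spec_solution (maps : List String) (out : Int) : Prop := out = solution_alt maps
instance (maps : List String) (out : Int) : Decidable (Spec_solution maps out) := by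
  unfold Spec_solution; infer_instance

-- ===== CLAIM (what is proved, stated in full; the proofs are below) =====
def Claim_equal_solution : Prop :=
  ∀ (maps : List String), Dom_solution maps → Pre_solution maps →
    Spec_solution maps (solution maps)

-- ===== LEMMAS AND PROOFS =====

lemma gridGetA_eq_gridGetB : gridGetA = gridGetB := rfl

-- number of unvisited cells
def unvis (v : List (List Bool)) : Nat := (v.map (fun row => row.count false)).sum

def GridShape (v : List (List Bool)) (R C : Nat) : Prop :=
  v.length = R ∧ ∀ row ∈ v, row.length = C

-- the visited matrix seen as the set 'seen ∪ acc' (the coupling between the two ports)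
def VisRel (rows cols : Int) (v : List (List Bool))
    (seen acc : List (Int × Int)) : Prop :=
  ∀ r c : Int, 0 ≤ r → r < rows → 0 ≤ c → c < cols →
    (visGet v r c = true ↔ ((r, c) ∈ seen ∨ (r, c) ∈ acc))

-- A-side per-direction discovery step, state (appended queue tail, visited)
def dstep (maps : List String) (rows cols cr cc : Int)
    (st : List (Int × Int) × List (List Bool)) (d : Int × Int) :
    List (Int × Int) × List (List Bool) :=
  let n : Int × Int := (cr + d.1, cc + d.2)
  if 0 ≤ n.1 ∧ n.1 < rows ∧ 0 ≤ n.2 ∧ n.2 < cols ∧ visGet st.2 n.1 n.2 = false ∧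
      gridGetA maps n.1 n.2 ≠ some 'X' then
    (st.1 ++ [n], visSet st.2 n.1 n.2)
  else st

-- generic fold helper
lemma foldl_pres {α β : Type} (P : β → Prop) (f : β → α → β) (l : List α) :
    ∀ b, P b → (∀ b' x, x ∈ l → P b' → P (f b' x)) → P (l.foldl f b) := by
  induction l with
  | nil => intro b h _; exact h
  | cons x t ih =>
    intro b h hstep
    exact ih _ (hstep b x (by simp) h)
      (fun b' y hy => hstep b' y (by simp [hy]))

-- grid facts -------------------------------------------------------------------

lemma visGet_bind (v : List (List Bool)) (r c : Int) (hr0 : 0 ≤ r) (hc0 : 0 ≤ c) :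
    visGet v r c = ((v[r.toNat]?).bind (fun row => row[c.toNat]?)).getD false := by
  unfold visGet
  rw [PySem.List.pyGet?_of_nonneg v hr0]
  cases v[r.toNat]? with
  | none => rfl
  | some row => simp [PySem.List.pyGet?_of_nonneg row hc0]

lemma visGet_eq (v : List (List Bool)) (r c : Int) (hr0 : 0 ≤ r) (hr : r.toNat < v.length)
    (hc0 : 0 ≤ c) (hc : c.toNat < (v[r.toNat]).length) :
    visGet v r c = v[r.toNat][c.toNat] := by
  rw [visGet_bind v r c hr0 hc0, List.getElem?_eq_getElem hr]
  simp [List.getElem?_eq_getElem hc]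

lemma visSet_eq (v : List (List Bool)) (r c : Int) (hr0 : 0 ≤ r) (hr : r.toNat < v.length)
    (hc0 : 0 ≤ c) :
    visSet v r c = v.set r.toNat ((v[r.toNat]).set c.toNat true) := by
  unfold visSet
  rw [PySem.List.pySetD_of_nonneg _ _ hr0, PySem.List.pySetD_of_nonneg _ _ hc0,
    PySem.List.pyGetD_eq_getElem v _ hr0 (by omega)]

lemma visGet_replicate (R C : Nat) (r c : Int) :
    visGet (List.replicate R (List.replicate C false)) r c = false := by
  unfold visGet
  cases h : PySem.List.pyGet? (List.replicate R (List.replicate C false)) r with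
  | none => rfl
  | some row =>
    have hrow := PySem.List.mem_of_pyGet?_eq_some (h := h)
    rw [List.eq_of_mem_replicate hrow]
    simp only [Option.bind_some]
    cases h2 : PySem.List.pyGet? (List.replicate C false) c with
    | none => simp
    | some b =>
      have hb := PySem.List.mem_of_pyGet?_eq_some (h := h2)
      simp [List.eq_of_mem_replicate hb]

lemma unvis_replicate (R C : Nat) :
    unvis (List.replicate R (List.replicate C false)) = R * C := by
  unfold unvis
  rw [List.map_replicate, List.count_replicate_self, List.sum_replicate, smul_eq_mul]

lemma visSet_shape (v : List (List Bool)) (R C : Nat) (r c : Int)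
    (hs : GridShape v R C) (hr0 : 0 ≤ r) (hr : r.toNat < R) (hc0 : 0 ≤ c) :
    GridShape (visSet v r c) R C := by
  obtain ⟨hlen, hrows⟩ := hs
  rw [visSet_eq v r c hr0 (by omega) hc0]
  refine ⟨by simp [hlen], ?_⟩
  intro row hm
  rcases List.mem_or_eq_of_mem_set hm with h | h
  · exact hrows _ h
  · subst h; rw [List.length_set]; exact hrows _ (List.getElem_mem _)

lemma visGet_visSet (v : List (List Bool)) (R C : Nat) (r c r' c' : Int)
    (hs : GridShape v R C) (hr0 : 0 ≤ r) (hr : r.toNat < R) (hc0 : 0 ≤ c)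
    (hc : c.toNat < C) (hr0' : 0 ≤ r') (hr' : r'.toNat < R) (hc0' : 0 ≤ c')
    (hc' : c'.toNat < C) :
    visGet (visSet v r c) r' c' = if r' = r ∧ c' = c then true else visGet v r' c' := by
  obtain ⟨hlen, hrows⟩ := hs
  have hrowlen : ∀ i (h : i < v.length), (v[i]).length = C :=
    fun i h => hrows _ (List.getElem_mem _)
  rw [visSet_eq v r c hr0 (by omega) hc0,
    visGet_bind _ r' c' hr0' hc0', visGet_bind v r' c' hr0' hc0']
  by_cases hrr : r' = r
  · subst hrr
    by_cases hcc : c' = c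
    · subst hcc
      have hcl : c'.toNat < (v[r'.toNat]).length := by rw [hrowlen _ (by omega)]; omega
      simp [List.getElem?_set, hcl, show r'.toNat < v.length by omega]
    · have hnn : c.toNat ≠ c'.toNat := by omega
      simp [List.getElem?_set, hnn, hcc, show r'.toNat < v.length by omega]
  · have hnn : r.toNat ≠ r'.toNat := by omega
    simp [List.getElem?_set, hnn, hrr]

lemma unvis_visSet (v : List (List Bool)) (R C : Nat) (r c : Int)
    (hs : GridShape v R C) (hr0 : 0 ≤ r) (hr : r.toNat < R) (hc0 : 0 ≤ c)
    (hc : c.toNat < C) (hfalse : visGet v r c = false) :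
    unvis (visSet v r c) + 1 = unvis v := by
  obtain ⟨hlen, hrows⟩ := hs
  have hrl : r.toNat < v.length := by omega
  have hrowlen : (v[r.toNat]).length = C := hrows _ (List.getElem_mem _)
  have hcell : v[r.toNat][c.toNat] = false := by
    rw [visGet_eq v r c hr0 hrl hc0 (by omega)] at hfalse; exact hfalse
  rw [visSet_eq v r c hr0 hrl hc0]
  unfold unvis
  rw [List.map_set]
  have hmem : r.toNat < (v.map (fun row => row.count false)).length := by simp; omega
  have e1 := List.sum_set (v.map (fun row => row.count false)) r.toNat
      (((v[r.toNat]).set c.toNat true).count false)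
  have e2 : (v.map (fun row => row.count false)).set r.toNat
      ((v[r.toNat]).count false) = v.map (fun row => row.count false) := by
    have h3 : (v.map (fun row => row.count false))[r.toNat] = (v[r.toNat]).count false := by
      simp
    rw [← h3, List.set_getElem_self]
  have e3 := List.sum_set (v.map (fun row => row.count false)) r.toNat ((v[r.toNat]).count false)
  rw [e2] at e3
  have hpos : 0 < List.count false v[r.toNat] := by
    apply List.count_pos_iff.mpr
    rw [← hcell]
    exact List.getElem_mem _
  have hcount : ((v[r.toNat]).set c.toNat true).count false + 1 = (v[r.toNat]).count false := by
    rw [List.count_set (by omega)]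
    simp [hcell]
    omega
  rw [e1, e3]
  simp only [hmem, if_pos]
  omega

-- dstep appends to its first component, so a queue prefix can be peeled off
lemma dstep_fold_base (maps : List String) (rows cols cr cc : Int) (ds : List (Int × Int)) :
    ∀ (a b : List (Int × Int)) (v : List (List Bool)),
      ds.foldl (dstep maps rows cols cr cc) (a ++ b, v) =
        (a ++ (ds.foldl (dstep maps rows cols cr cc) (b, v)).1,
         (ds.foldl (dstep maps rows cols cr cc) (b, v)).2) := by
  induction ds with
  | nil => intro a b v; simp
  | cons d ds ih =>
    intro a b v
    have hstep : dstep maps rows cols cr cc (a ++ b, v) d =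
        (a ++ (dstep maps rows cols cr cc (b, v) d).1,
         (dstep maps rows cols cr cc (b, v) d).2) := by
      unfold dstep
      dsimp only
      split_ifs with h
      · simp
      · rfl
    simp only [List.foldl_cons]
    rw [hstep, ih]

-- A's fold over range(4) is its queue with the dstep-discovered cells appended at dist d+1
lemma stepA_fold_shape (maps : List String) (rows cols cr cc t : Int)
    (q0 : List (Int × Int × Int)) (v : List (List Bool)) :
    (PySem.List.pyRange 0 4 1).foldl (stepA maps rows cols cr cc t) (q0, v) =
      (q0 ++ ((dirsB.foldl (dstep maps rows cols cr cc) ([], v)).1).map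
          (fun p => (p.1, p.2, t + 1)),
       (dirsB.foldl (dstep maps rows cols cr cc) ([], v)).2) := by
  have hstep : ∀ (i : Int) (d : Int × Int), PySem.List.pyGetD dirR i 0 = d.1 →
      PySem.List.pyGetD dirC i 0 = d.2 →
      ∀ (a : List (Int × Int)) (w : List (List Bool)),
      stepA maps rows cols cr cc t (q0 ++ a.map (fun p => (p.1, p.2, t + 1)), w) i =
        (q0 ++ ((dstep maps rows cols cr cc (a, w) d).1).map (fun p => (p.1, p.2, t + 1)),
         (dstep maps rows cols cr cc (a, w) d).2) := by
    intro i d h1 h2 a w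
    unfold stepA dstep
    dsimp only
    rw [h1, h2]
    split_ifs with h
    · simp
    · rfl
  have hr4 : PySem.List.pyRange 0 4 1 = [0, 1, 2, 3] := by decide
  rw [hr4]
  have hbase : ((q0, v) : List (Int × Int × Int) × List (List Bool)) =
      (q0 ++ ([] : List (Int × Int)).map (fun p => (p.1, p.2, t + 1)), v) := by simp
  simp only [List.foldl_cons, List.foldl_nil]
  rw [hbase, hstep 0 (0, 1) (by decide) (by decide),
    hstep 1 (1, 0) (by decide) (by decide),
    hstep 2 (0, -1) (by decide) (by decide),
    hstep 3 (-1, 0) (by decide) (by decide)]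
  rfl

-- one direction: A's discovery list grows exactly like B's comprehension set
lemma dir_step (maps : List String) (rows cols cr cc : Int) (seen : PySem.Set (Int × Int))
    (acc : List (Int × Int)) (v : List (List Bool)) (d : Int × Int)
    (h2 : VisRel rows cols v seen acc) (h3 : GridShape v rows.toNat cols.toNat) :
    (dstep maps rows cols cr cc (acc, v) d).1 = bdir maps rows cols seen cr cc acc d ∧
    VisRel rows cols (dstep maps rows cols cr cc (acc, v) d).2 seen
      (dstep maps rows cols cr cc (acc, v) d).1 ∧
    GridShape (dstep maps rows cols cr cc (acc, v) d).2 rows.toNat cols.toNat ∧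
    (dstep maps rows cols cr cc (acc, v) d).1.length +
        unvis (dstep maps rows cols cr cc (acc, v) d).2 = acc.length + unvis v := by
  unfold dstep bdir
  dsimp only
  rw [← gridGetA_eq_gridGetB]
  set n : Int × Int := (cr + d.1, cc + d.2) with hn
  by_cases hrange : 0 ≤ n.1 ∧ n.1 < rows ∧ 0 ≤ n.2 ∧ n.2 < cols
  · by_cases hx : gridGetA maps n.1 n.2 ≠ some 'X'
    · by_cases hv : visGet v n.1 n.2 = false
      · -- fresh cell: both append it
        have hnm : ¬ ((n.1, n.2) ∈ seen ∨ (n.1, n.2) ∈ acc) := by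
          intro hmem
          have := (h2 n.1 n.2 hrange.1 hrange.2.1 hrange.2.2.1 hrange.2.2.2).mpr hmem
          rw [hv] at this
          exact Bool.false_ne_true this
        have hne : (n.1, n.2) = n := rfl
        rw [hne] at hnm
        push_neg at hnm
        have hcont : PySem.Set.contains seen n = false := by
          rw [← Bool.not_eq_true]
          intro hcl
          exact hnm.1 ((PySem.Set.contains_iff seen n).mp hcl)
        rw [if_pos ⟨hrange.1, hrange.2.1, hrange.2.2.1, hrange.2.2.2, hv, hx⟩,
          if_pos ⟨hrange.1, hrange.2.1, hrange.2.2.1, hrange.2.2.2, hx, hcont⟩]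
        refine ⟨(PySem.Set.add_of_not_mem hnm.2).symm, ?_, ?_, ?_⟩
        · intro r c hr0 hr hc0 hc
          rw [visGet_visSet v rows.toNat cols.toNat n.1 n.2 r c h3 hrange.1 (by omega)
            hrange.2.2.1 (by omega) hr0 (by omega) hc0 (by omega)]
          constructor
          · intro h
            by_cases hcase : r = n.1 ∧ c = n.2
            · right
              simp [hcase.1, hcase.2, hn]
            · rw [if_neg hcase] at h
              rcases (h2 r c hr0 hr hc0 hc).mp h with h' | h'
              · exact Or.inl h'
              · exact Or.inr (by simp [h'])
          · intro h
            by_cases hcase : r = n.1 ∧ c = n.2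
            · rw [if_pos hcase]
            · rw [if_neg hcase]
              rcases h with h' | h'
              · exact (h2 r c hr0 hr hc0 hc).mpr (Or.inl h')
              · rcases List.mem_append.mp h' with h'' | h''
                · exact (h2 r c hr0 hr hc0 hc).mpr (Or.inr h'')
                · exact absurd (by simpa [hn] using h'') hcase
        · exact visSet_shape v _ _ n.1 n.2 h3 hrange.1 (by omega) hrange.2.2.1
        · have hb1 : (0 : Int) ≤ cr + d.1 := hrange.1
          have hb2 : cr + d.1 < rows := hrange.2.1
          have hb3 : (0 : Int) ≤ cc + d.2 := hrange.2.2.1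
          have hb4 : cc + d.2 < cols := hrange.2.2.2
          have := unvis_visSet v rows.toNat cols.toNat (cr + d.1) (cc + d.2) h3 hb1
            (by omega) hb3 (by omega) hv
          simp only [List.length_append, List.length_cons, List.length_nil]
          omega
      · -- already visited: A skips; B skips or re-adds a member
        rw [if_neg (by intro h'; exact hv h'.2.2.2.2.1)]
        have hmem : (n.1, n.2) ∈ seen ∨ (n.1, n.2) ∈ acc := by
          apply (h2 n.1 n.2 hrange.1 hrange.2.1 hrange.2.2.1 hrange.2.2.2).mp
          revert hv
          cases visGet v n.1 n.2 <;> simp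
        have hne : (n.1, n.2) = n := rfl
        rw [hne] at hmem
        by_cases hseen : n ∈ seen
        · rw [if_neg (by
            intro h'
            rw [(PySem.Set.contains_iff seen n).mpr hseen] at h'
            exact absurd h'.2.2.2.2.2 (by decide))]
          exact ⟨rfl, h2, h3, rfl⟩
        · have hacc : n ∈ acc := by tauto
          refine ⟨?_, h2, h3, rfl⟩
          split_ifs with h'
          · exact (PySem.Set.add_of_mem hacc).symm
          · rfl
    · push_neg at hx
      rw [if_neg (by intro h'; exact h'.2.2.2.2.2 hx),
        if_neg (by intro h'; exact h'.2.2.2.2.1 hx)]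
      exact ⟨rfl, h2, h3, rfl⟩
  · rw [if_neg (by intro h'; exact hrange ⟨h'.1, h'.2.1, h'.2.2.1, h'.2.2.2.1⟩),
      if_neg (by intro h'; exact hrange ⟨h'.1, h'.2.1, h'.2.2.1, h'.2.2.2.1⟩)]
    exact ⟨rfl, h2, h3, rfl⟩

-- all four directions of one node
lemma dirs_fold (maps : List String) (rows cols cr cc : Int) (seen : PySem.Set (Int × Int))
    (ds : List (Int × Int)) :
    ∀ (acc : List (Int × Int)) (v : List (List Bool)),
      VisRel rows cols v seen acc → GridShape v rows.toNat cols.toNat →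
      (ds.foldl (dstep maps rows cols cr cc) (acc, v)).1 =
          ds.foldl (bdir maps rows cols seen cr cc) acc ∧
      VisRel rows cols (ds.foldl (dstep maps rows cols cr cc) (acc, v)).2 seen
        (ds.foldl (dstep maps rows cols cr cc) (acc, v)).1 ∧
      GridShape (ds.foldl (dstep maps rows cols cr cc) (acc, v)).2 rows.toNat cols.toNat ∧
      (ds.foldl (dstep maps rows cols cr cc) (acc, v)).1.length +
          unvis (ds.foldl (dstep maps rows cols cr cc) (acc, v)).2 =
        acc.length + unvis v := by
  induction ds with
  | nil => intro acc v h2 h3; exact ⟨rfl, h2, h3, rfl⟩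
  | cons d ds ih =>
    intro acc v h2 h3
    obtain ⟨e1, e2, e3, e4⟩ := dir_step maps rows cols cr cc seen acc v d h2 h3
    simp only [List.foldl_cons]
    obtain ⟨f1, f2, f3, f4⟩ := ih (dstep maps rows cols cr cc (acc, v) d).1
      (dstep maps rows cols cr cc (acc, v) d).2 e2 e3
    refine ⟨?_, f2, f3, f4.trans e4⟩
    rw [← e1]
    exact f1

-- if the target is somewhere in the queue's current level, A returns the level's distance
lemma popsToDst (maps : List String) (rows cols : Int) (dst : Int × Int) (t : Int) :
    ∀ (F : List (Int × Int)) (G : List (Int × Int × Int)) (v : List (List Bool))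
      (fuelA : Nat), dst ∈ F → F.length ≤ fuelA →
      bfsLoopA maps rows cols dst fuelA (F.map (fun p => (p.1, p.2, t)) ++ G) v = t := by
  intro F
  induction F with
  | nil => intro G v fuelA h _; simp at h
  | cons p F' ih =>
    intro G v fuelA hmem hlen
    simp only [List.length_cons] at hlen
    obtain ⟨f, rfl⟩ : ∃ f, fuelA = f + 1 := ⟨fuelA - 1, by omega⟩
    simp only [List.map_cons, List.cons_append, bfsLoopA]
    by_cases hpd : (p.1, p.2) = dst
    · rw [if_pos hpd]
    · rw [if_neg hpd]
      have hmem' : dst ∈ F' := by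
        rcases List.mem_cons.mp hmem with h | h
        · exact absurd h.symm hpd
        · exact h
      rw [stepA_fold_shape, List.append_assoc]
      exact ih _ _ f hmem' (by omega)

-- A pops one whole level: the queue becomes the discovered next level, in B's order
lemma process_level (maps : List String) (rows cols : Int) (dst : Int × Int)
    (seen : PySem.Set (Int × Int)) (t : Int) :
    ∀ (todo acc : List (Int × Int)) (v : List (List Bool)) (fuelA : Nat),
      VisRel rows cols v seen acc → GridShape v rows.toNat cols.toNat →
      (∀ p ∈ todo, (p.1, p.2) ≠ dst) → todo.length ≤ fuelA →
      (bfsLoopA maps rows cols dst fuelA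
          (todo.map (fun p => (p.1, p.2, t)) ++ acc.map (fun p => (p.1, p.2, t + 1))) v =
        bfsLoopA maps rows cols dst (fuelA - todo.length)
          ((todo.foldl (fun st p => dirsB.foldl (dstep maps rows cols p.1 p.2) st)
              (acc, v)).1.map (fun p => (p.1, p.2, t + 1)))
          (todo.foldl (fun st p => dirsB.foldl (dstep maps rows cols p.1 p.2) st)
              (acc, v)).2) ∧
      (todo.foldl (fun st p => dirsB.foldl (dstep maps rows cols p.1 p.2) st) (acc, v)).1 =
        todo.foldl (fun a p => dirsB.foldl (bdir maps rows cols seen p.1 p.2) a) acc ∧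
      VisRel rows cols
        (todo.foldl (fun st p => dirsB.foldl (dstep maps rows cols p.1 p.2) st) (acc, v)).2
        seen
        (todo.foldl (fun st p => dirsB.foldl (dstep maps rows cols p.1 p.2) st) (acc, v)).1 ∧
      GridShape
        (todo.foldl (fun st p => dirsB.foldl (dstep maps rows cols p.1 p.2) st) (acc, v)).2
        rows.toNat cols.toNat ∧
      (todo.foldl (fun st p => dirsB.foldl (dstep maps rows cols p.1 p.2) st) (acc, v)).1.length
          + unvis (todo.foldl (fun st p => dirsB.foldl (dstep maps rows cols p.1 p.2) st)
              (acc, v)).2 =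
        acc.length + unvis v := by
  intro todo
  induction todo with
  | nil =>
    intro acc v fuelA h2 h3 _ _
    refine ⟨?_, rfl, h2, h3, rfl⟩
    simp
  | cons p T ih =>
    intro acc v fuelA h2 h3 hd hlen
    simp only [List.length_cons] at hlen
    obtain ⟨f, rfl⟩ : ∃ f, fuelA = f + 1 := ⟨fuelA - 1, by omega⟩
    have hbase := dstep_fold_base maps rows cols p.1 p.2 dirsB acc [] v
    have hX : dirsB.foldl (dstep maps rows cols p.1 p.2) (acc, v) =
        (acc ++ (dirsB.foldl (dstep maps rows cols p.1 p.2) ([], v)).1,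
         (dirsB.foldl (dstep maps rows cols p.1 p.2) ([], v)).2) := by
      simpa using hbase
    obtain ⟨g1, g2, g3, g4⟩ := dirs_fold maps rows cols p.1 p.2 seen dirsB acc v h2 h3
    obtain ⟨e1, e2, e3, e4, e5⟩ := ih (dirsB.foldl (dstep maps rows cols p.1 p.2) (acc, v)).1
      (dirsB.foldl (dstep maps rows cols p.1 p.2) (acc, v)).2 f g2 g3
      (fun q hq => hd q (by simp [hq])) (by omega)
    refine ⟨?_, ?_, e3, e4, e5.trans g4⟩
    · simp only [List.map_cons, List.cons_append, bfsLoopA, List.length_cons]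
      rw [if_neg (hd p (List.mem_cons_self))]
      rw [stepA_fold_shape]
      dsimp only
      rw [List.append_assoc, ← List.map_append,
        show acc ++ (dirsB.foldl (dstep maps rows cols p.1 p.2) ([], v)).1 =
            (dirsB.foldl (dstep maps rows cols p.1 p.2) (acc, v)).1 from
          (congrArg Prod.fst hX).symm,
        show (dirsB.foldl (dstep maps rows cols p.1 p.2) ([], v)).2 =
            (dirsB.foldl (dstep maps rows cols p.1 p.2) (acc, v)).2 from
          (congrArg Prod.snd hX).symm,
        show f + 1 - (T.length + 1) = f - T.length from by omega]
      simp only [List.foldl_cons]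
      exact e1
    · simp only [List.foldl_cons]
      rw [← g1]
      exact e2

-- the main coupling: A's queue BFS against B's level-synchronous loop
lemma level_sim (maps : List String) (rows cols : Int) (dst : Int × Int) :
    ∀ (fuelB : Nat) (t : Int) (seen fr : PySem.Set (Int × Int)) (v : List (List Bool))
      (fuelA : Nat),
      VisRel rows cols v seen [] → GridShape v rows.toNat cols.toNat →
      fr.length + unvis v ≤ fuelA → unvis v + 2 ≤ fuelB →
      bfsLoopA maps rows cols dst fuelA (fr.map (fun p => (p.1, p.2, t))) v =
        levelLoop maps rows cols dst fuelB t seen fr := by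
  intro fuelB
  induction fuelB with
  | zero => intro t seen fr v fuelA h2 h3 h5 h6; omega
  | succ f ih =>
    intro t seen fr v fuelA h2 h3 h5 h6
    by_cases hfr : fr = []
    · subst hfr
      simp only [List.map_nil, levelLoop, if_pos rfl]
      cases fuelA <;> rfl
    · by_cases hdst : PySem.Set.contains fr dst = true
      · have hmem : dst ∈ fr := (PySem.Set.contains_iff fr dst).mp hdst
        have hpop := popsToDst maps rows cols dst t fr [] v fuelA hmem (by omega)
        simp only [List.append_nil] at hpop
        rw [hpop]
        simp only [levelLoop]
        rw [if_neg hfr, if_pos hdst]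
      · have hdn : dst ∉ fr := fun h => hdst ((PySem.Set.contains_iff fr dst).mpr h)
        have hd : ∀ p ∈ fr, (p.1, p.2) ≠ dst := by
          intro p hp he
          exact hdn (by rw [← he]; exact hp)
        obtain ⟨e1, e2, e3, e4, e5⟩ :=
          process_level maps rows cols dst seen t fr [] v fuelA h2 h3 hd (by omega)
        set X := fr.foldl (fun st p => dirsB.foldl (dstep maps rows cols p.1 p.2) st)
          (([] : List (Int × Int)), v) with hXdef
        have hnxt : nextFrontier maps rows cols seen fr = X.1 := e2.symm
        have hA : bfsLoopA maps rows cols dst fuelA (fr.map (fun p => (p.1, p.2, t))) v =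
            bfsLoopA maps rows cols dst (fuelA - fr.length)
              (X.1.map (fun p => (p.1, p.2, t + 1))) X.2 := by
          rw [List.map_nil, List.append_nil] at e1
          exact e1
        rw [hA]
        rw [show levelLoop maps rows cols dst (f + 1) t seen fr =
              levelLoop maps rows cols dst f (t + 1)
                (PySem.Set.union seen (nextFrontier maps rows cols seen fr))
                (nextFrontier maps rows cols seen fr) from by
            simp only [levelLoop]
            rw [if_neg hfr, if_neg hdst]]
        rw [hnxt]
        have he5 : X.1.length + unvis X.2 = unvis v := by simpa using e5
        by_cases hempty : X.1 = []
        · rw [hempty]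
          simp only [List.map_nil]
          have h1 : bfsLoopA maps rows cols dst (fuelA - fr.length) [] X.2 = -1 := by
            cases (fuelA - fr.length) <;> rfl
          rw [h1]
          obtain ⟨f', rfl⟩ : ∃ f', f = f' + 1 := ⟨f - 1, by omega⟩
          simp [levelLoop]
        · apply ih (t + 1) (PySem.Set.union seen X.1) X.1 X.2 (fuelA - fr.length)
          · intro r c hr0 hr hc0 hc
            rw [e3 r c hr0 hr hc0 hc]
            simp [PySem.Set.mem_union]
          · exact e4
          · omega
          · have hlen1 : 1 ≤ X.1.length :=
              Nat.pos_of_ne_zero (fun h0 => hempty (List.eq_nil_of_length_eq_zero h0))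
            omega

lemma bfsA_eq_steps (maps : List String) (rows cols : Int) (s dst : Int × Int)
    (hs1 : 0 ≤ s.1) (hs1' : s.1 < rows) (hs2 : 0 ≤ s.2) (hs2' : s.2 < cols) :
    bfsA maps rows cols s dst = steps maps rows cols s dst := by
  have hofs : PySem.Set.ofList [s] = [s] :=
    PySem.Set.ofList_eq_self_of_nodup [s] (List.nodup_singleton s)
  have hshape0 : GridShape (List.replicate rows.toNat (List.replicate cols.toNat false))
      rows.toNat cols.toNat :=
    ⟨by simp, fun row hm => by rw [List.eq_of_mem_replicate hm]; simp⟩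
  have hshape1 := visSet_shape _ rows.toNat cols.toNat s.1 s.2 hshape0 hs1 (by omega) hs2
  have h2 : VisRel rows cols
      (visSet (List.replicate rows.toNat (List.replicate cols.toNat false)) s.1 s.2)
      [s] [] := by
    intro r c hr0 hr hc0 hc
    rw [visGet_visSet _ rows.toNat cols.toNat s.1 s.2 r c hshape0 hs1 (by omega) hs2
      (by omega) hr0 (by omega) hc0 (by omega)]
    constructor
    · intro h
      by_cases hcase : r = s.1 ∧ c = s.2
      · left
        simp [Prod.ext_iff, hcase.1, hcase.2]
      · rw [if_neg hcase, visGet_replicate] at h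
        exact absurd h (by decide)
    · intro h
      rcases h with h | h
      · simp only [List.mem_singleton] at h
        subst h
        simp
      · simp at h
  have hunv : unvis (visSet (List.replicate rows.toNat (List.replicate cols.toNat false))
      s.1 s.2) + 1 = rows.toNat * cols.toNat := by
    have hu1 := unvis_visSet _ rows.toNat cols.toNat s.1 s.2 hshape0 hs1 (by omega) hs2
      (by omega) (visGet_replicate _ _ _ _)
    have hu2 := unvis_replicate rows.toNat cols.toNat
    omega
  show bfsLoopA maps rows cols dst (rows.toNat * cols.toNat) [(s.1, s.2, 0)]
      (visSet (List.replicate rows.toNat (List.replicate cols.toNat false)) s.1 s.2) =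
    levelLoop maps rows cols dst (rows.toNat * cols.toNat + 1) 0
      (PySem.Set.ofList [s]) (PySem.Set.ofList [s])
  rw [hofs, show [(s.1, s.2, (0 : Int))] = [s].map (fun p => (p.1, p.2, (0 : Int))) by simp]
  apply level_sim maps rows cols dst (rows.toNat * cols.toNat + 1) 0 [s] [s] _ _ h2 hshape1
  · simp only [List.length_singleton]
    omega
  · omega

-- scan coupling -----------------------------------------------------------------

def ScanRel (st : Option (Int × Int) × Option (Int × Int) × Option (Int × Int))
    (d : PySem.Dict Char (Int × Int)) : Prop :=
  d.get? 'S' = st.1 ∧ d.get? 'E' = st.2.1 ∧ d.get? 'L' = st.2.2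

-- one grid cell: A's if-chain against B's marker-dict insert
lemma scan_cell (r c : Int) (ch : Char)
    (st : Option (Int × Int) × Option (Int × Int) × Option (Int × Int))
    (pos : PySem.Dict Char (Int × Int)) (hrel : ScanRel st pos) :
    ScanRel
      (if (some ch : Option Char) = some 'S' then (some (r, c), st.2.1, st.2.2)
       else if (some ch : Option Char) = some 'E' then (st.1, some (r, c), st.2.2)
       else if (some ch : Option Char) = some 'L' then (st.1, st.2.1, some (r, c))
       else st)
      (if ("SEL".toList.contains ch) then pos.insert ch (r, c) else pos) := by
  obtain ⟨hS, hE, hL⟩ := hrel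
  by_cases h1 : ch = 'S'
  · subst h1
    refine ⟨?_, ?_, ?_⟩ <;> simp [PySem.Dict.get?_insert, hS, hE, hL]
  · by_cases h2 : ch = 'E'
    · subst h2
      refine ⟨?_, ?_, ?_⟩ <;> simp [PySem.Dict.get?_insert, hS, hE, hL]
    · by_cases h3 : ch = 'L'
      · subst h3
        refine ⟨?_, ?_, ?_⟩ <;> simp [PySem.Dict.get?_insert, hS, hE, hL]
      · have hcon : ("SEL".toList.contains ch) = false := by
          simp [show "SEL".toList = ['S', 'E', 'L'] from rfl, h1, h2, h3]
        rw [if_neg (by simp [h1]), if_neg (by simp [h2]), if_neg (by simp [h3]), hcon]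
        exact ⟨hS, hE, hL⟩

-- columns at or beyond the stored row prefix are no-ops for A's scan
lemma scan_noop (maps : List String) (cols r : Int) (row : String)
    (hrow : PySem.List.pyGet? maps r = some row) (hc : 0 ≤ cols) (k : Nat)
    (hk : (row.toList.take cols.toNat).length ≤ k) :
    ∀ (st : Option (Int × Int) × Option (Int × Int) × Option (Int × Int)),
      (PySem.List.pyRange (k : Int) cols 1).foldl (fun st c =>
        if gridGetA maps r c = some 'S' then (some (r, c), st.2.1, st.2.2)
        else if gridGetA maps r c = some 'E' then (st.1, some (r, c), st.2.2)
        else if gridGetA maps r c = some 'L' then (st.1, st.2.1, some (r, c))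
        else st) st = st := by
  intro st
  rw [PySem.List.foldl_congr_mem _ _ (fun st _ => st) st ?_, PySem.List.foldl_ignore]
  intro acc c hmem
  obtain ⟨h1, h2⟩ := PySem.List.mem_pyRange_one.mp hmem
  have h0c : (0 : Int) ≤ c := le_trans (by positivity) h1
  have hnone : PySem.List.pyGet? row.toList c = none := by
    have hlen : (List.take cols.toNat row.toList).length = min cols.toNat row.toList.length :=
      List.length_take
    have hcc : ((cols.toNat : Int)) = cols := Int.toNat_of_nonneg hc
    have hm : row.toList.length ≤ c.toNat := by omega
    rw [PySem.List.pyGet?_of_nonneg _ h0c]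
    exact List.getElem?_eq_none hm
  simp [gridGetA, hrow, hnone]

lemma scan_inner (maps : List String) (cols r : Int) (row : String)
    (hrow : PySem.List.pyGet? maps r = some row) (hc : 0 ≤ cols) :
    ∀ (n k : Nat) (st : Option (Int × Int) × Option (Int × Int) × Option (Int × Int))
      (pos : PySem.Dict Char (Int × Int)),
      (row.toList.take cols.toNat).length - k ≤ n →
      k ≤ (row.toList.take cols.toNat).length → ScanRel st pos →
      ScanRel
        ((PySem.List.pyRange k cols 1).foldl (fun st c =>
          if gridGetA maps r c = some 'S' then (some (r, c), st.2.1, st.2.2)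
          else if gridGetA maps r c = some 'E' then (st.1, some (r, c), st.2.2)
          else if gridGetA maps r c = some 'L' then (st.1, st.2.1, some (r, c))
          else st) st)
        ((PySem.List.enumerate ((row.toList.take cols.toNat).drop k) k).foldl
          (fun pos cp =>
            if ("SEL".toList.contains cp.2) then pos.insert cp.2 (r, cp.1) else pos)
          pos) := by
  intro n
  induction n with
  | zero =>
    intro k st pos hle hk hrel
    have hkeq : k = (row.toList.take cols.toNat).length := by omega
    rw [scan_noop maps cols r row hrow hc k (by omega) st]
    rw [List.drop_eq_nil_of_le (by omega),
      show PySem.List.enumerate ([] : List Char) (k : Int) = [] from rfl]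
    simpa using hrel
  | succ n ih =>
    intro k st pos hle hk hrel
    by_cases hkeq : (row.toList.take cols.toNat).length ≤ k
    · rw [scan_noop maps cols r row hrow hc k hkeq st]
      rw [List.drop_eq_nil_of_le hkeq,
        show PySem.List.enumerate ([] : List Char) (k : Int) = [] from rfl]
      simpa using hrel
    · have hlt : k < (row.toList.take cols.toNat).length := by omega
      have hlen : (List.take cols.toNat row.toList).length = min cols.toNat row.toList.length :=
        List.length_take
      have hcc : ((cols.toNat : Int)) = cols := Int.toNat_of_nonneg hc
      have hkc : (k : Int) < cols := by omega
      rw [PySem.List.pyRange_one_cons hkc, List.drop_eq_getElem_cons hlt]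
      rw [show PySem.List.enumerate ((row.toList.take cols.toNat)[k] ::
            List.drop (k + 1) (row.toList.take cols.toNat)) (k : Int) =
          ((k : Int), (row.toList.take cols.toNat)[k]) ::
            PySem.List.enumerate (List.drop (k + 1) (row.toList.take cols.toNat))
              ((k : Int) + 1) from rfl]
      simp only [List.foldl_cons]
      have hkm : k < row.toList.length := by omega
      have hcell : gridGetA maps r (k : Int) = some (row.toList.take cols.toNat)[k] := by
        simp only [gridGetA, hrow]
        rw [show ((some row).bind fun s => PySem.Str.pyGet? s (k : Int)) =
              PySem.Str.pyGet? row (k : Int) from rfl]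
        rw [PySem.Str.pyGet?_natCast, List.getElem?_eq_getElem hkm]
        simp [List.getElem_take]
      rw [hcell]
      have hrel' := scan_cell r (k : Int) (row.toList.take cols.toNat)[k] st pos hrel
      have := ih (k + 1) _ _ (by omega) (by omega) hrel'
      rw [show ((k : Int) + 1) = (((k + 1 : Nat)) : Int) by push_cast; ring] at *
      exact this

lemma scan_eq (maps : List String) (cols : Int) (hc : 0 ≤ cols) :
    ScanRel (scanA maps maps.length cols) (scanB maps cols) := by
  have houter : ∀ (n k : Nat)
      (st : Option (Int × Int) × Option (Int × Int) × Option (Int × Int))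
      (pos : PySem.Dict Char (Int × Int)),
      maps.length - k ≤ n → k ≤ maps.length → ScanRel st pos →
      ScanRel
        ((PySem.List.pyRange (k : Int) (maps.length : Int) 1).foldl (fun st r =>
          (PySem.List.pyRange 0 cols 1).foldl (fun st c =>
            if gridGetA maps r c = some 'S' then (some (r, c), st.2.1, st.2.2)
            else if gridGetA maps r c = some 'E' then (st.1, some (r, c), st.2.2)
            else if gridGetA maps r c = some 'L' then (st.1, st.2.1, some (r, c))
            else st) st) st)
        ((PySem.List.enumerate (maps.drop k) (k : Int)).foldl (fun pos rp =>
          (PySem.List.enumerate (PySem.List.slice rp.2.toList none (some cols))).foldl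
            (fun pos cp =>
              if ("SEL".toList.contains cp.2) then pos.insert cp.2 (rp.1, cp.1) else pos)
            pos) pos) := by
    intro n
    induction n with
    | zero =>
      intro k st pos hle hk hrel
      have hkeq : k = maps.length := by omega
      rw [PySem.List.pyRange_one_eq_nil (a := (k : Int)) (b := (maps.length : Int)) (by omega),
        List.drop_eq_nil_of_le (by omega),
        show PySem.List.enumerate ([] : List String) (k : Int) = [] from rfl]
      simpa using hrel
    | succ n ih =>
      intro k st pos hle hk hrel
      by_cases hkeq : maps.length ≤ k
      · rw [PySem.List.pyRange_one_eq_nil (a := (k : Int)) (b := (maps.length : Int)) (by omega),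
          List.drop_eq_nil_of_le hkeq,
          show PySem.List.enumerate ([] : List String) (k : Int) = [] from rfl]
        simpa using hrel
      · have hlt : k < maps.length := by omega
        rw [PySem.List.pyRange_one_cons (a := (k : Int)) (b := (maps.length : Int))
            (by exact_mod_cast hlt),
          List.drop_eq_getElem_cons hlt]
        rw [show PySem.List.enumerate (maps[k] :: List.drop (k + 1) maps) (k : Int) =
            ((k : Int), maps[k]) :: PySem.List.enumerate (List.drop (k + 1) maps)
              ((k : Int) + 1) from rfl]
        simp only [List.foldl_cons]
        have hrowk : PySem.List.pyGet? maps (k : Int) = some maps[k] := by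
          rw [PySem.List.pyGet?_of_nonneg maps (by positivity)]
          simp
        have hinner := scan_inner maps cols (k : Int) maps[k] hrowk hc
          ((maps[k].toList.take cols.toNat).length) 0 st pos (by omega) (by omega) hrel
        rw [PySem.List.slice_to maps[k].toList hc]
        simp only [Nat.cast_zero, List.drop_zero] at hinner
        have := ih (k + 1) _ _ (by omega) (by omega) hinner
        rw [show ((k : Int) + 1) = (((k + 1 : Nat)) : Int) by push_cast; ring] at *
        exact this
  have h := houter maps.length 0 (none, none, none) PySem.Dict.empty (by omega) (by omega)
    ⟨PySem.Dict.get?_empty _, PySem.Dict.get?_empty _, PySem.Dict.get?_empty _⟩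
  unfold scanA scanB
  simpa using h

def ScanBounds (rows cols : Int)
    (st : Option (Int × Int) × Option (Int × Int) × Option (Int × Int)) : Prop :=
  (∀ p : Int × Int, st.1 = some p → 0 ≤ p.1 ∧ p.1 < rows ∧ 0 ≤ p.2 ∧ p.2 < cols) ∧
  (∀ p : Int × Int, st.2.1 = some p → 0 ≤ p.1 ∧ p.1 < rows ∧ 0 ≤ p.2 ∧ p.2 < cols) ∧
  (∀ p : Int × Int, st.2.2 = some p → 0 ≤ p.1 ∧ p.1 < rows ∧ 0 ≤ p.2 ∧ p.2 < cols)

lemma scan_bounds (maps : List String) (rows cols : Int) :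
    ScanBounds rows cols (scanA maps rows cols) := by
  unfold scanA
  apply foldl_pres (ScanBounds rows cols)
  · exact ⟨fun p h => by simp at h, fun p h => by simp at h, fun p h => by simp at h⟩
  · intro st r hr h
    have hrb : 0 ≤ r ∧ r < rows := (PySem.List.mem_pyRange_one.mp hr)
    apply foldl_pres (ScanBounds rows cols) _ _ _ h
    intro st' c hc h'
    have hcb : 0 ≤ c ∧ c < cols := (PySem.List.mem_pyRange_one.mp hc)
    obtain ⟨h1, h2, h3⟩ := h'
    split_ifs
    · exact ⟨fun p hp => by cases hp; exact ⟨hrb.1, hrb.2, hcb.1, hcb.2⟩, h2, h3⟩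
    · exact ⟨h1, fun p hp => by cases hp; exact ⟨hrb.1, hrb.2, hcb.1, hcb.2⟩, h3⟩
    · exact ⟨h1, h2, fun p hp => by cases hp; exact ⟨hrb.1, hrb.2, hcb.1, hcb.2⟩⟩
    · exact ⟨h1, h2, h3⟩

-- ===== VERDICT (by name: the statement is the Claim_ definition above) =====
theorem solution_spec : Claim_equal_solution := by
  unfold Claim_equal_solution
  intro maps _ _
  unfold Spec_solution
  cases maps with
  | nil => simp [solution, solution_alt]
  | cons m0 mr =>
    obtain ⟨hS, hE, hL⟩ := scan_eq (m0 :: mr) m0.toList.length (by positivity)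
    obtain ⟨hbS, hbE, hbL⟩ := scan_bounds (m0 :: mr) (m0 :: mr).length m0.toList.length
    simp only [solution, solution_alt, if_neg (List.cons_ne_nil m0 mr), List.headI]
    rw [hS, hE, hL]
    rcases hsc : scanA (m0 :: mr) (m0 :: mr).length m0.toList.length with ⟨os, oe, ol⟩
    rw [hsc] at hbS hbE hbL
    cases os with
    | none => cases oe <;> cases ol <;> rfl
    | some s =>
      cases oe with
      | none => cases ol <;> rfl
      | some e =>
        cases ol with
        | none => rfl
        | some l =>
          have hsb := hbS s rfl
          have hlb := hbL l rfl
          have e1 := bfsA_eq_steps (m0 :: mr) (m0 :: mr).length m0.toList.length s l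
            hsb.1 hsb.2.1 hsb.2.2.1 hsb.2.2.2
          have e2 := bfsA_eq_steps (m0 :: mr) (m0 :: mr).length m0.toList.length l e
            hlb.1 hlb.2.1 hlb.2.2.1 hlb.2.2.2
          simp only [← e1, ← e2]
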